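-- pv_equiv track=rewrite | github.com/BoboSamson/pygents | pygents/token.py | tokenize_detaching_tail
-- ===== SOURCE A (Python) =====
-- def tokenize_detaching_tail(text,chars="'\":,;.!?}])"):
--     tokens = []
--     length = len(text)
--     for i in range(length):
--         tail = length - i - 1
--         found = chars.find(text[tail])
--         if found >= 0:
--             tokens.append(chars[found])
--         else:
--             tokens.reverse()
--             return tokens, text[:tail + 1]
--     tokens.reverse()
--     return tokens, None
-- ===== SOURCE B (Python) =====
-- def tokenize_detaching_tail(text, chars="'\":,;.!?}])"):
--     remaining = text.rstrip(chars)
--     return list(text[len(remaining):]), (remaining or None)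
-- ===== Notes on version B (the rewrite author's own statement) =====
-- stated objective: simpler
-- what changed: Replaces A's explicit right-to-left indexed loop with accumulator and early return by a single rstrip(chars) library call plus one slice to recover the detached tail.
import Mathlib
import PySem

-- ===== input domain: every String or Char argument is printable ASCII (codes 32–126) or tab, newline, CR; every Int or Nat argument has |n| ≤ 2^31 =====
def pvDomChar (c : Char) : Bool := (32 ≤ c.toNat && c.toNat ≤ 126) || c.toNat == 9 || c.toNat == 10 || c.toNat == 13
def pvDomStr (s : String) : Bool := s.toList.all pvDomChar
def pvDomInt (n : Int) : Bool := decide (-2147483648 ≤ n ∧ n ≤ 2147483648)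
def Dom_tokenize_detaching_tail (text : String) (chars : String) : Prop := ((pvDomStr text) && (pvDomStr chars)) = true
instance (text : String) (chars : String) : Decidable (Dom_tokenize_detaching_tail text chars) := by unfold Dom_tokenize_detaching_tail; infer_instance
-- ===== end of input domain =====

-- B strips the trailing run with one rstrip(chars)-style pass and recovers the detached tail by slicing,
-- instead of A's explicit right-to-left indexed loop with accumulator and early return (objective: simpler).

-- ===== PORT A =====
-- the for-loop over range(length) with early return; i counts iterations, tokens is the accumulator.
-- text[tail] and chars[found] are in range whenever read (tail < length, 0 ≤ found < len(chars)), so getD never uses its default.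
def tdtLoop (cs : List Char) (chars : String) (i : Nat) (tokens : List String) :
    List String × Option String :=
  if _h : i < cs.length then
    let tail := cs.length - i - 1
    let c := cs[tail]?.getD ' '
    let found := PySem.Str.find chars (String.ofList [c])
    if 0 ≤ found then
      tdtLoop cs chars (i + 1) (tokens ++ [String.ofList [chars.toList[found.toNat]?.getD ' ']])
    else
      (tokens.reverse, some (String.ofList (cs.take (tail + 1))))
  else
    (tokens.reverse, none)
termination_by cs.length - i

def tokenize_detaching_tail (text : String) (chars : String) : List String × Option String :=
  tdtLoop text.toList chars 0 []

-- ===== PORT B =====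
def tokenize_detaching_tail_alt (text : String) (chars : String) : List String × Option String :=
  let cs := text.toList
  -- text.rstrip(chars): drop the trailing run of characters belonging to chars (exact port of str.rstrip with an argument)
  let remaining := (cs.reverse.dropWhile (fun c => c ∈ chars.toList)).reverse
  -- list(text[len(remaining):])
  let tokens := (cs.drop remaining.length).map (fun c => String.ofList [c])
  (tokens, if remaining.isEmpty then none else some (String.ofList remaining))

-- ===== PRECONDITION & SPEC =====
def Spec_tokenize_detaching_tail (text : String) (chars : String) (out : List String × Option String) : Prop := out = tokenize_detaching_tail_alt text chars
instance (text : String) (chars : String) (out : List String × Option String) : Decidable (Spec_tokenize_detaching_tail text chars out) := by unfold Spec_tokenize_detaching_tail; infer_instance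

-- ===== CLAIM (what is proved, stated in full; the proofs are below) =====
def Claim_equal_tokenize_detaching_tail : Prop := ∀ (text : String) (chars : String), Dom_tokenize_detaching_tail text chars → Spec_tokenize_detaching_tail text chars (tokenize_detaching_tail text chars)

-- ===== LEMMAS AND PROOFS =====

-- a single character occurs as an infix iff it is a member
theorem singleton_infix_iff_mem {c : Char} {l : List Char} : [c] <:+: l ↔ c ∈ l := by
  constructor
  · intro h; exact h.subset (List.mem_singleton_self c)
  · intro h
    obtain ⟨s, t, rfl⟩ := List.append_of_mem h
    exact ⟨s, t, by simp⟩

theorem find_nonneg_iff_mem (chars : String) (c : Char) :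
    (0 ≤ PySem.Str.find chars (String.ofList [c])) ↔ c ∈ chars.toList := by
  rw [PySem.Str.find_eq]
  have h1 : (String.ofList [c]).toList = [c] := by simp
  rw [h1, PySem.Chars.find_nonneg_iff]
  exact singleton_infix_iff_mem

-- when found = chars.find(c) is nonnegative, chars[found] = c
theorem char_at_find (chars : String) (c : Char)
    (h : 0 ≤ PySem.Str.find chars (String.ofList [c])) :
    chars.toList[(PySem.Str.find chars (String.ofList [c])).toNat]?.getD ' ' = c := by
  have h1 : (String.ofList [c]).toList = [c] := by simp
  rw [PySem.Str.find_eq, h1] at h ⊢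
  set n := (PySem.Chars.find chars.toList [c]).toNat with hn
  obtain ⟨t, ht⟩ := (PySem.Chars.find_spec (s := chars.toList) (sub := [c]) h).1
  have hd : chars.toList.drop n = c :: t := by simpa using ht.symm
  have hlt : n < chars.toList.length := by
    by_contra hge
    rw [List.drop_eq_nil_of_le (by omega)] at hd
    simp at hd
  rw [List.getElem?_eq_getElem hlt]
  have h0 : (chars.toList.drop n)[0]'(by rw [hd]; simp) = c := by simp [hd]
  rw [List.getElem_drop] at h0
  simpa using h0

-- the loop, read as a structural scan of the not-yet-seen reversed suffix
theorem tdtLoop_eq_scan (cs : List Char) (chars : String) :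
    ∀ i tokens, i ≤ cs.length →
    tdtLoop cs chars i tokens =
      ((tokens ++ ((cs.reverse.drop i).takeWhile (fun c => c ∈ chars.toList)).map
          (fun c => String.ofList [c])).reverse,
       let d := (cs.reverse.drop i).dropWhile (fun c => c ∈ chars.toList)
       if d.isEmpty then none else some (String.ofList d.reverse)) := by
  intro i tokens hi
  induction h : cs.length - i generalizing i tokens with
  | zero =>
    have hie : i = cs.length := by omega
    subst hie
    rw [tdtLoop]
    have hnil : cs.reverse.drop cs.length = [] := by
      apply List.drop_eq_nil_of_le; simp
    simp [hnil]
  | succ n ih =>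
    have hlt : i < cs.length := by omega
    rw [tdtLoop]
    simp only [hlt, dif_pos]
    have hdrop : cs.reverse.drop i = cs[cs.length - i - 1]?.getD ' ' :: cs.reverse.drop (i + 1) := by
      have h1 : i < cs.reverse.length := by simpa using hlt
      rw [List.drop_eq_getElem_cons h1]
      congr 1
      rw [List.getElem_reverse]
      rw [List.getElem?_eq_getElem (by omega : cs.length - i - 1 < cs.length)]
      simp only [Option.getD_some]
      congr 1
      omega
    by_cases hf : 0 ≤ PySem.Str.find chars (String.ofList [cs[cs.length - i - 1]?.getD ' '])
    · rw [if_pos hf]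
      rw [ih (i + 1) _ (by omega) (by omega)]
      rw [char_at_find chars _ hf]
      have hmem : (cs[cs.length - i - 1]?.getD ' ' ∈ chars.toList) :=
        (find_nonneg_iff_mem chars _).mp hf
      have hb : decide ((cs[cs.length - i - 1]?.getD ' ') ∈ chars.toList) = true := by
        simpa using hmem
      rw [hdrop]
      simp [hb]
    · rw [if_neg hf]
      have hmem : ¬ (cs[cs.length - i - 1]?.getD ' ' ∈ chars.toList) := by
        intro hm; exact hf ((find_nonneg_iff_mem chars _).mpr hm)
      have hb : decide ((cs[cs.length - i - 1]?.getD ' ') ∈ chars.toList) = false := by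
        simpa using hmem
      rw [hdrop]
      simp only [List.takeWhile_cons, List.dropWhile_cons, hb,
        List.map_nil, List.append_nil, List.isEmpty_cons, Bool.false_eq_true, if_false]
      refine Prod.ext rfl ?_
      simp only []
      congr 2
      rw [← hdrop, List.reverse_drop, List.reverse_reverse, List.length_reverse]
      congr 1
      omega

theorem tdt_eq (text chars : String) :
    tokenize_detaching_tail text chars = tokenize_detaching_tail_alt text chars := by
  unfold tokenize_detaching_tail tokenize_detaching_tail_alt
  rw [tdtLoop_eq_scan text.toList chars 0 [] (Nat.zero_le _)]
  simp only [List.drop_zero, List.nil_append]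
  set cs := text.toList
  set p : Char → Bool := fun c => decide (c ∈ chars.toList) with hp
  have hsplit : cs = (cs.reverse.dropWhile p).reverse ++ (cs.reverse.takeWhile p).reverse := by
    conv_lhs => rw [← List.reverse_reverse cs,
      ← List.takeWhile_append_dropWhile (p := p) (l := cs.reverse)]
    rw [List.reverse_append]
  have h1 : cs.drop (cs.reverse.dropWhile p).reverse.length = (cs.reverse.takeWhile p).reverse := by
    have hdl := List.drop_left (l₁ := (cs.reverse.dropWhile p).reverse)
      (l₂ := (cs.reverse.takeWhile p).reverse)
    rw [← hsplit] at hdl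
    exact hdl
  rw [h1]
  rw [List.isEmpty_reverse]
  rw [List.map_reverse]

-- ===== VERDICT (by name: the statement is the Claim_ definition above) =====
theorem tokenize_detaching_tail_spec : Claim_equal_tokenize_detaching_tail := by
  intro text chars _
  unfold Spec_tokenize_detaching_tail
  exact tdt_eq text chars
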